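-- pv_equiv track=rewrite | github.com/vrthra/mimid | Cmimid/src/treeminer.py | last_comparisons
-- ===== SOURCE A (Python) =====
-- def last_comparisons(comparisons):
--     LAST_COMPARISON_HEURISTIC = True
--     last_cmp_only = {}
--     last_idx = {}
--
--     # get the last indexes compared in methods.
--     # first, for each method, find the index that
--     # was accessed in that method invocation last.
--     for idx, char, mid in comparisons:
--         if mid in last_idx:
--             if idx > last_idx[mid]:
--                 last_idx[mid] = idx
--         else:
--             last_idx[mid] = idx
--
--     # next, for each index, find the method that
--     # accessed it last.
--     for idx, char, mid in comparisons:
--         if LAST_COMPARISON_HEURISTIC: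
--             if idx in last_cmp_only:
--                 midC = last_cmp_only[idx]
--                 if midC > mid:
--                     # do not clobber children unless it was the last character
--                     # for that child.
--                     if last_idx[mid] > idx:
--                         # if it was the last index, may be the child used it
--                         # as a boundary check.
--                         continue
--         last_cmp_only[idx] = mid
--     return last_cmp_only
-- ===== SOURCE B (Python) =====
-- def last_comparisons(comparisons):
--     # B: group-by-index decomposition — compute last_idx with max/get, group each
--     # index's accessed mids in order, then reduce each group independently.
--     last_idx = {}
--     for idx, _, mid in comparisons:
--         last_idx[mid] = max(idx, last_idx.get(mid, idx))
--
--     groups = {}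
--     for idx, _, mid in comparisons:
--         groups.setdefault(idx, []).append(mid)
--
--     out = {}
--     for idx, mids in groups.items():
--         cur = mids[0]
--         for m in mids[1:]:
--             if not (cur > m and last_idx[m] > idx):
--                 cur = m
--         out[idx] = cur
--     return out
-- ===== Notes on version B (the rewrite author's own statement) =====
-- stated objective: alternative
-- what changed: A's flat sequential second scan over all comparisons is replaced by building an index table grouping each index's accessed mids in order, then reducing each index's group independently with the keep/overwrite rule (last_idx itself is computed with a one-line max/get update).
import Mathlib
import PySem

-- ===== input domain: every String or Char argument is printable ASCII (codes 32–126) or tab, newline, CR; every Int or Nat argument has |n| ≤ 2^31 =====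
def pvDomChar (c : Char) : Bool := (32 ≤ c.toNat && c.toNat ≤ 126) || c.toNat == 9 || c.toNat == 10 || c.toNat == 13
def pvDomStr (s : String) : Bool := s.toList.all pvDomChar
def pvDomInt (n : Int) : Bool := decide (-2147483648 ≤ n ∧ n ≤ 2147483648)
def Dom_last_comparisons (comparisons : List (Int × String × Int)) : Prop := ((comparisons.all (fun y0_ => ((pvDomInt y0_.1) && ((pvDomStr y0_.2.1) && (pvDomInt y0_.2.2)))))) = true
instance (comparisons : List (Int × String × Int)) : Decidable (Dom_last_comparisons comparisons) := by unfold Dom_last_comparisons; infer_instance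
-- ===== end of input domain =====

-- B replaces A's flat sequential second scan by a group-by-index table followed by an
-- independent per-index reduction (alternative decomposition, same O(n) cost).


-- ===== PORT A =====
-- literal port of A; `last_idx[mid]` in the second loop can never raise (every mid of
-- `comparisons` is a key of last_idx after the first loop), so `getD … 0` is exact there.
def last_comparisons (comparisons : List (Int × String × Int)) : List (Int × Int) :=
  let last_idx : PySem.Dict Int Int :=
    comparisons.foldl (fun d t =>
      match PySem.Dict.get? d t.2.2 with
      | some v => if t.1 > v then PySem.Dict.insert d t.2.2 t.1 else d
      | none => PySem.Dict.insert d t.2.2 t.1) PySem.Dict.empty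
  let last_cmp_only : PySem.Dict Int Int :=
    comparisons.foldl (fun d t =>
      match PySem.Dict.get? d t.1 with
      | some midC =>
        if midC > t.2.2 then
          if PySem.Dict.getD last_idx t.2.2 0 > t.1 then d
          else PySem.Dict.insert d t.1 t.2.2
        else PySem.Dict.insert d t.1 t.2.2
      | none => PySem.Dict.insert d t.1 t.2.2) PySem.Dict.empty
  last_cmp_only.items

-- ===== PORT B =====
-- port of Source B; `mids[0]`/`last_idx[m]` never raise (groups' values are nonempty, every
-- grouped mid is a key of last_idx), so headD/getD with default 0 are exact.
def last_comparisons_alt (comparisons : List (Int × String × Int)) : List (Int × Int) :=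
  let last_idx : PySem.Dict Int Int :=
    comparisons.foldl (fun d t =>
      PySem.Dict.insert d t.2.2 (max t.1 (PySem.Dict.getD d t.2.2 t.1))) PySem.Dict.empty
  let groups : PySem.Dict Int (List Int) :=
    comparisons.foldl (fun g t =>
      PySem.Dict.modify g t.1 [] (· ++ [t.2.2])) PySem.Dict.empty
  let out : PySem.Dict Int Int :=
    groups.items.foldl (fun o p =>
      PySem.Dict.insert o p.1
        (p.2.tail.foldl (fun cur m =>
          if cur > m && PySem.Dict.getD last_idx m 0 > p.1 then cur else m) (p.2.headD 0)))
      PySem.Dict.empty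
  out.items

-- ===== PRECONDITION & SPEC =====
def Spec_last_comparisons (comparisons : List (Int × String × Int)) (out : List (Int × Int)) : Prop := out = last_comparisons_alt comparisons
instance (comparisons : List (Int × String × Int)) (out : List (Int × Int)) : Decidable (Spec_last_comparisons comparisons out) := by unfold Spec_last_comparisons; infer_instance

-- ===== CLAIM (what is proved, stated in full; the proofs are below) =====
def Claim_equal_last_comparisons : Prop := ∀ (comparisons : List (Int × String × Int)), Dom_last_comparisons comparisons → Spec_last_comparisons comparisons (last_comparisons comparisons)

-- ===== LEMMAS AND PROOFS =====

lemma pv_insert_self (d : PySem.Dict Int Int) (k v : Int) (hnd : d.keys.Nodup)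
    (h : PySem.Dict.get? d k = some v) : PySem.Dict.insert d k v = d := by
  have hc : d.contains k = true := by
    rw [PySem.Dict.contains_eq_isSome_get?, h]; rfl
  apply PySem.Dict.ext
  rw [PySem.Dict.items_insert_of_contains d v hc]
  conv_rhs => rw [← List.map_id d.items]
  apply List.map_congr_left
  intro p hp
  by_cases hk : p.1 = k
  · have := PySem.Dict.get?_of_mem_items d (k := p.1) (v := p.2) (by simpa using hp) hnd
    rw [hk, h] at this
    have hv : p.2 = v := by simpa using this.symm
    simp [hk, hv.symm, Prod.ext_iff]
  · simp [hk]

def pvStep1A (d : PySem.Dict Int Int) (t : Int × String × Int) : PySem.Dict Int Int :=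
  match PySem.Dict.get? d t.2.2 with
  | some v => if t.1 > v then PySem.Dict.insert d t.2.2 t.1 else d
  | none => PySem.Dict.insert d t.2.2 t.1

lemma pv_lastidx_gen (l : List (Int × String × Int)) : ∀ (d : PySem.Dict Int Int), d.keys.Nodup →
    l.foldl pvStep1A d
      = l.foldl (fun d t => PySem.Dict.insert d t.2.2 (max t.1 (PySem.Dict.getD d t.2.2 t.1))) d := by
  induction l with
  | nil => intro d _; rfl
  | cons t l ih =>
    intro d hnd
    simp only [List.foldl_cons]
    have hstep : pvStep1A d t = PySem.Dict.insert d t.2.2 (max t.1 (PySem.Dict.getD d t.2.2 t.1)) := by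
      unfold pvStep1A
      cases h : PySem.Dict.get? d t.2.2 with
      | none => rw [PySem.Dict.getD_of_get?_eq_none d t.1 h]; simp
      | some v =>
        rw [PySem.Dict.getD_of_get?_eq_some d t.1 h]
        by_cases hlt : t.1 > v
        · simp [hlt, max_eq_left (le_of_lt hlt)]
        · rw [max_eq_right (le_of_not_gt hlt), pv_insert_self d _ _ hnd h]
          simp [hlt]
    rw [hstep, ih _ (PySem.Dict.nodup_keys_insert _ _ _ hnd)]

def pvRule (L : PySem.Dict Int Int) (idx cur m : Int) : Int :=
  if cur > m then (if PySem.Dict.getD L m 0 > idx then cur else m) else m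

def pvMids (l : List (Int × String × Int)) (k : Int) : List Int :=
  (l.filter (fun t => t.1 == k)).map (fun t => t.2.2)

def pvOptFold (L : PySem.Dict Int Int) (k : Int) : List Int → Option Int
  | [] => none
  | m :: rest => some (rest.foldl (pvRule L k) m)

def pvStep2A (L : PySem.Dict Int Int) (d : PySem.Dict Int Int) (t : Int × String × Int) : PySem.Dict Int Int :=
  match PySem.Dict.get? d t.1 with
  | some midC =>
    if midC > t.2.2 then
      if PySem.Dict.getD L t.2.2 0 > t.1 then d
      else PySem.Dict.insert d t.1 t.2.2
    else PySem.Dict.insert d t.1 t.2.2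
  | none => PySem.Dict.insert d t.1 t.2.2

lemma pvMids_append (l : List (Int × String × Int)) (t : Int × String × Int) (k : Int) :
    pvMids (l ++ [t]) k = pvMids l k ++ (if t.1 = k then [t.2.2] else []) := by
  unfold pvMids
  rw [List.filter_append, List.map_append]
  congr 1
  by_cases h : t.1 = k <;> simp [h]

lemma pvOptFold_append (L : PySem.Dict Int Int) (k m : Int) (ms : List Int) (hne : ms ≠ []) :
    pvOptFold L k (ms ++ [m]) = (pvOptFold L k ms).map (fun cur => pvRule L k cur m) := by
  match ms with
  | [] => exact absurd rfl hne
  | a :: rest => simp [pvOptFold, List.foldl_append]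

lemma pv_mainA (L : PySem.Dict Int Int) (l : List (Int × String × Int)) :
    (l.foldl (pvStep2A L) PySem.Dict.empty).keys = PySem.Set.ofList (l.map (·.1))
    ∧ ∀ k, (l.foldl (pvStep2A L) PySem.Dict.empty).get? k = pvOptFold L k (pvMids l k) := by
  induction l using List.reverseRecOn with
  | nil => exact ⟨by simp [PySem.Dict.keys_empty], fun k => by simp [pvMids, pvOptFold, PySem.Dict.get?_empty, List.filter]⟩
  | append_singleton l t ih =>
    obtain ⟨hkeys, hget⟩ := ih
    set D := l.foldl (pvStep2A L) PySem.Dict.empty with hD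
    have hfold : (l ++ [t]).foldl (pvStep2A L) PySem.Dict.empty = pvStep2A L D t := by
      rw [List.foldl_append]; rfl
    have hmap : (l ++ [t]).map (·.1) = l.map (·.1) ++ [t.1] := by simp
    rw [hfold, hmap, PySem.Set.ofList_append_singleton, ← hkeys]
    cases hg : PySem.Dict.get? D t.1 with
    | none =>
      have hcont : D.contains t.1 = false := by
        rw [PySem.Dict.contains_eq_isSome_get?, hg]; rfl
      have hnm : t.1 ∉ D.keys := by
        intro hm; rw [← PySem.Dict.contains_iff_mem_keys] at hm; rw [hcont] at hm; cases hm
      have hmids : pvMids l t.1 = [] := by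
        have := hget t.1; rw [hg] at this
        cases hms : pvMids l t.1 with
        | nil => rfl
        | cons a rest => rw [hms] at this; simp [pvOptFold] at this
      have hstep : pvStep2A L D t = PySem.Dict.insert D t.1 t.2.2 := by
        unfold pvStep2A; rw [hg]
      constructor
      · rw [hstep, PySem.Dict.keys_insert_of_not_contains D t.2.2 hcont,
            PySem.Set.add_of_not_mem hnm]
      · intro k
        rw [hstep, pvMids_append, PySem.Dict.get?_insert]
        by_cases hk : k = t.1
        · subst hk; simp [hmids, pvOptFold]
        · have : ¬ t.1 = k := fun h => hk h.symm
          simp [hk, this, hget k]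
    | some cur =>
      have hcont : D.contains t.1 = true := by
        rw [PySem.Dict.contains_eq_isSome_get?, hg]; rfl
      have hm : t.1 ∈ D.keys := by rw [← PySem.Dict.contains_iff_mem_keys]; exact hcont
      have hmids_ne : pvMids l t.1 ≠ [] := by
        intro hms
        have := hget t.1; rw [hg, hms] at this; simp [pvOptFold] at this
      have hcur : pvOptFold L t.1 (pvMids l t.1) = some cur := by rw [← hget t.1, hg]
      have hkeq : PySem.Set.add D.keys t.1 = D.keys := PySem.Set.add_of_mem hm
      have hnd : D.keys.Nodup := by rw [hkeys]; exact PySem.Set.nodup_ofList _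
      -- value after the step at t.1 is pvRule applied to cur
      have hins : pvStep2A L D t = PySem.Dict.insert D t.1 (pvRule L t.1 cur t.2.2) := by
        unfold pvStep2A; rw [hg]; dsimp only; unfold pvRule
        by_cases h1 : cur > t.2.2
        · by_cases h2 : PySem.Dict.getD L t.2.2 0 > t.1
          · rw [if_pos h1, if_pos h2, if_pos h1, if_pos h2, pv_insert_self D _ _ hnd hg]
          · simp [h1, h2]
        · simp [h1]
      constructor
      · rw [hins, PySem.Dict.keys_insert_of_contains D _ hcont, hkeq]
      · intro k
        rw [hins, pvMids_append, PySem.Dict.get?_insert]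
        by_cases hk : k = t.1
        · subst hk
          rw [if_pos rfl, if_pos rfl, pvOptFold_append L t.1 _ _ hmids_ne, hcur]
          rfl
        · have : ¬ t.1 = k := fun h => hk h.symm
          simp [hk, this, hget k]

lemma pvRule_eq (L : PySem.Dict Int Int) (k : Int) :
    (fun cur m => if cur > m && PySem.Dict.getD L m 0 > k then cur else m) = pvRule L k := by
  funext cur m
  unfold pvRule
  by_cases h1 : cur > m <;> by_cases h2 : PySem.Dict.getD L m 0 > k <;> simp [h1, h2]

lemma pvMids_ne_nil (l : List (Int × String × Int)) (k : Int)
    (h : k ∈ l.map (fun t => t.1)) : pvMids l k ≠ [] := by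
  intro hnil
  unfold pvMids at hnil
  rw [List.map_eq_nil_iff, List.filter_eq_nil_iff] at hnil
  obtain ⟨t, ht, hk⟩ := List.mem_map.mp h
  exact hnil t ht (by simp [hk])

theorem pv_final (l : List (Int × String × Int)) : last_comparisons l = last_comparisons_alt l := by
  unfold last_comparisons last_comparisons_alt
  simp only
  -- name the shared pieces
  set L := l.foldl pvStep1A PySem.Dict.empty with hL
  have hLdef : (l.foldl (fun d t =>
      match PySem.Dict.get? d t.2.2 with
      | some v => if t.1 > v then PySem.Dict.insert d t.2.2 t.1 else d
      | none => PySem.Dict.insert d t.2.2 t.1) PySem.Dict.empty) = L := rfl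
  have hLB : (l.foldl (fun d t =>
      PySem.Dict.insert d t.2.2 (max t.1 (PySem.Dict.getD d t.2.2 t.1))) PySem.Dict.empty) = L :=
    (pv_lastidx_gen l PySem.Dict.empty PySem.Dict.nodup_keys_empty).symm
  rw [hLdef, hLB]
  set D := l.foldl (pvStep2A L) PySem.Dict.empty with hDdef
  have hDeq : (l.foldl (fun d t =>
      match PySem.Dict.get? d t.1 with
      | some midC =>
        if midC > t.2.2 then
          if PySem.Dict.getD L t.2.2 0 > t.1 then d
          else PySem.Dict.insert d t.1 t.2.2
        else PySem.Dict.insert d t.1 t.2.2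
      | none => PySem.Dict.insert d t.1 t.2.2) PySem.Dict.empty) = D := rfl
  rw [hDeq]
  obtain ⟨hkeys, hget⟩ := pv_mainA L l
  set G := l.foldl (fun g t => PySem.Dict.modify g t.1 [] (· ++ [t.2.2])) PySem.Dict.empty with hGdef
  -- groups facts
  have hGkeys : G.keys = PySem.Set.ofList (l.map (fun t => t.1)) := by
    rw [hGdef]
    rw [PySem.Dict.keys_foldl_modify_key l (fun t => t.1) [] (fun _ t => (· ++ [t.2.2])) PySem.Dict.empty]
    rw [PySem.Dict.keys_empty, PySem.Set.update_nil_left]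
  have hGnd : G.keys.Nodup := by rw [hGkeys]; exact PySem.Set.nodup_ofList _
  have hGget : ∀ k, PySem.Dict.getD G k [] = pvMids l k := by
    intro k
    rw [hGdef]
    have hmapfold : l.foldl (fun g t => PySem.Dict.modify g t.1 [] (· ++ [t.2.2])) PySem.Dict.empty
        = (l.map (fun t => (t.1, t.2.2))).foldl (fun d p => PySem.Dict.modify d p.1 [] (· ++ [p.2])) PySem.Dict.empty := by
      rw [List.foldl_map]
    rw [hmapfold, PySem.Dict.getD_foldl_modify_append, PySem.Dict.getD_empty]
    unfold pvMids
    rw [List.filter_map]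
    simp [Function.comp_def]
  -- out = map over groups items
  have hout : (G.items.foldl (fun o p =>
      PySem.Dict.insert o p.1
        (p.2.tail.foldl (fun cur m =>
          if cur > m && PySem.Dict.getD L m 0 > p.1 then cur else m) (p.2.headD 0)))
      PySem.Dict.empty).items
      = G.items.map (fun p => (p.1, p.2.tail.foldl (pvRule L p.1) (p.2.headD 0))) := by
    rw [PySem.Dict.items_foldl_insert_fresh G.items (fun p => p.1) _ PySem.Dict.empty
        (fun a _ => PySem.Dict.contains_empty _) (by exact hGnd)]
    rw [show (PySem.Dict.empty : PySem.Dict Int Int).items = [] from rfl, List.nil_append]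
    apply List.map_congr_left
    intro p _
    rw [pvRule_eq L p.1]
  rw [hout]
  -- rewrite both sides as maps over equal key lists
  have hDnd : D.keys.Nodup := by rw [hkeys]; exact PySem.Set.nodup_ofList _
  rw [PySem.Dict.items_eq_map_keys D hDnd 0, PySem.Dict.items_eq_map_keys G hGnd [], List.map_map]
  rw [hkeys, hGkeys]
  apply List.map_congr_left
  intro k hk
  have hkmem : k ∈ l.map (fun t => t.1) := by
    rwa [PySem.Set.mem_ofList] at hk
  have hne := pvMids_ne_nil l k hkmem
  simp only [Function.comp]
  rw [hGget k]
  rw [PySem.Dict.getD_eq_get?_getD, hget k]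
  cases hms : pvMids l k with
  | nil => exact absurd hms hne
  | cons a rest => simp [pvOptFold]

-- ===== VERDICT (by name: the statement is the Claim_ definition above) =====
theorem last_comparisons_spec : Claim_equal_last_comparisons := by
  intro comparisons _
  exact pv_final comparisons
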